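-- pv_equiv track=rewrite | github.com/BryceByeongchan/psi-skills | skills/psi-qe-input-validator/qe_input_validator.py | _strip_fortran_comment
-- ===== SOURCE A (Python) =====
-- def _strip_fortran_comment(line: str) -> str:
--     in_quote = False
--     qchar = ""
--     for i, c in enumerate(line):
--         if in_quote:
--             if c == qchar:
--                 in_quote = False
--         elif c in ("'", '"'):
--             in_quote = True
--             qchar = c
--         elif c == "!":
--             return line[:i]
--     return line
-- ===== SOURCE B (Python) =====
-- def _strip_fortran_comment(line: str) -> str:
--     i = 0
--     n = len(line)
--     while i < n:
--         c = line[i]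
--         if c in ("'", '"'):
--             j = line.find(c, i + 1)
--             if j == -1:
--                 return line  # unterminated quote: rest of line is quoted
--             i = j + 1
--         elif c == "!":
--             return line[:i]
--         else:
--             i += 1
--     return line
-- ===== Notes on version B (the rewrite author's own statement) =====
-- stated objective: alternative
-- what changed: Replaces A's per-character in_quote/qchar state machine with an index loop that jumps over whole quoted segments via str.find, so no quoting state is carried at all.
import Mathlib
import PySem

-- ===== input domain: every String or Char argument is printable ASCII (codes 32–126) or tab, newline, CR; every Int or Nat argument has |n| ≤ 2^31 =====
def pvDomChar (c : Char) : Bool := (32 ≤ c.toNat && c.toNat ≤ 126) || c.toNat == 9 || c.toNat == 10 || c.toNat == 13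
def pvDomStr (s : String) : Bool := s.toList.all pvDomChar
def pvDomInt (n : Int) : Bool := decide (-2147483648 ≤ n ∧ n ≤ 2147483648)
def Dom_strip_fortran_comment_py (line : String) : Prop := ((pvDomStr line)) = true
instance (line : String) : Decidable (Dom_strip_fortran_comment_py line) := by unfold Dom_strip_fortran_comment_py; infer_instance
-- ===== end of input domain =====

-- B replaces A's per-character in_quote/qchar state machine with an index loop that
-- skips whole quoted segments via str.find (objective: alternative structure, same cost).

-- ===== PORT A =====
-- A's for-loop over enumerate(line) with state (in_quote, qchar); qchar is only ever read
-- after being set to the opening quote char, so it is carried as a Char (initial value unread).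
def stripA_loop (line : String) : List Char → Nat → Bool → Char → String
  | [], _, _, _ => line
  | c :: rest, i, in_quote, qchar =>
    if in_quote then
      if c = qchar then stripA_loop line rest (i + 1) false qchar
      else stripA_loop line rest (i + 1) true qchar
    else if c = '\'' ∨ c = '"' then stripA_loop line rest (i + 1) true c
    else if c = '!' then String.mk (line.toList.take i)  -- line[:i], i ≥ 0: exact
    else stripA_loop line rest (i + 1) false qchar

def strip_fortran_comment_py (line : String) : String :=
  stripA_loop line line.toList 0 false ' '

-- ===== PORT B =====
-- B's while-loop over index i; line.find(c, i+1) is ported as findIdx? on the suffix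
-- after position i (exact: both give the first occurrence at index ≥ i+1, none = -1).
def stripB_loop (line : String) : List Char → Nat → String
  | [], _ => line
  | c :: rest, i =>
    if c = '\'' ∨ c = '"' then
      match rest.findIdx? (· = c) with
      | none => line
      | some k => stripB_loop line (rest.drop (k + 1)) (i + 1 + k + 1)
    else if c = '!' then String.mk (line.toList.take i)  -- line[:i]
    else stripB_loop line rest (i + 1)
termination_by l _ => l.length
decreasing_by
  · simpa using Nat.lt_succ_of_le (Nat.le_trans (List.length_drop_le _ _) (Nat.le_refl _))
  · simp

def strip_fortran_comment_py_alt (line : String) : String :=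
  stripB_loop line line.toList 0

-- ===== PRECONDITION & SPEC =====
def Spec_strip_fortran_comment_py (line : String) (out : String) : Prop := out = strip_fortran_comment_py_alt line
instance (line : String) (out : String) : Decidable (Spec_strip_fortran_comment_py line out) := by unfold Spec_strip_fortran_comment_py; infer_instance

-- ===== CLAIM (what is proved, stated in full; the proofs are below) =====
def Claim_equal_strip_fortran_comment_py : Prop := ∀ (line : String), Dom_strip_fortran_comment_py line → Spec_strip_fortran_comment_py line (strip_fortran_comment_py line)

-- ===== LEMMAS AND PROOFS =====

-- Inside a quote, A's loop just scans to the first occurrence of qchar.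
theorem stripA_in_quote (line : String) : ∀ (rest : List Char) (j : Nat) (q : Char),
    stripA_loop line rest j true q =
      match rest.findIdx? (· = q) with
      | none => line
      | some k => stripA_loop line (rest.drop (k + 1)) (j + k + 1) false q := by
  intro rest
  induction rest with
  | nil => intro j q; rfl
  | cons c rest ih =>
    intro j q
    by_cases hc : c = q
    · simp [stripA_loop, hc, List.findIdx?_cons]
    · simp only [stripA_loop, if_neg hc, List.findIdx?_cons, decide_eq_true_eq, hc, if_false, ih]
      cases h : rest.findIdx? (· = q) with
      | none => simp
      | some k =>
        simp only [Option.map_some]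
        have : j + 1 + k + 1 = j + (k + 1) + 1 := by omega
        simp [this]

theorem stripAB (line : String) : ∀ (n : Nat) (rest : List Char) (j : Nat) (q : Char),
    rest.length ≤ n → stripA_loop line rest j false q = stripB_loop line rest j := by
  intro n
  induction n with
  | zero =>
    intro rest j q h
    have : rest = [] := List.eq_nil_of_length_eq_zero (Nat.le_zero.mp h)
    subst this; simp [stripA_loop, stripB_loop]
  | succ n ih =>
    intro rest j q h
    cases rest with
    | nil => simp [stripA_loop, stripB_loop]
    | cons c rest =>
      by_cases hq : c = '\'' ∨ c = '"'
      · rw [stripA_loop]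
        simp only [Bool.false_eq_true, if_false, if_pos hq]
        rw [stripA_in_quote, stripB_loop]
        simp only [if_pos hq]
        cases hf : rest.findIdx? (· = c) with
        | none => simp
        | some k =>
          have hlen : (rest.drop (k + 1)).length ≤ n := by
            simp only [List.length_drop]; simp at h; omega
          simp only [ih _ _ c hlen]
      · by_cases hb : c = '!'
        · simp [stripA_loop, stripB_loop, hb]
        · rw [stripA_loop, if_neg (by simp), if_neg hq, if_neg hb]
          rw [stripB_loop, if_neg hq, if_neg hb]
          exact ih rest (j + 1) q (by simp at h; omega)

-- ===== VERDICT (by name: the statement is the Claim_ definition above) =====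
theorem strip_fortran_comment_py_spec : Claim_equal_strip_fortran_comment_py := by
  intro line _
  unfold Spec_strip_fortran_comment_py strip_fortran_comment_py strip_fortran_comment_py_alt
  exact stripAB line line.toList.length line.toList 0 ' ' (Nat.le_refl _)
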